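-- pv_equiv track=rewrite | github.com/athipan1/Database_painaidee | app/services/keyword_extraction.py | get_keyword_categories
-- ===== SOURCE A (Python) =====
-- from typing import List, Dict, Optional
--
-- def get_keyword_categories(keywords: List[str]) -> Dict[str, List[str]]:
--     """Categorize keywords into different types."""
--     categories = {
--         'places': [],
--         'nature': [],
--         'culture': [],
--         'activities': [],
--         'food': [],
--         'other': []
--     }
--
--     # Simple keyword categorization
--     nature_words = {'river', 'mountain', 'forest', 'beach', 'park', 'nature', 'tree', 'water', 'sea', 'lake'}
--     culture_words = {'temple', 'museum', 'ancient', 'historical', 'culture', 'traditional', 'art', 'heritage'}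
--     activity_words = {'shopping', 'restaurant', 'cafe', 'market', 'festival', 'tour', 'experience'}
--     food_words = {'food', 'restaurant', 'cafe', 'local', 'cuisine', 'dish', 'taste', 'delicious'}
--
--     for keyword in keywords:
--         keyword_lower = keyword.lower()
--         if any(word in keyword_lower for word in nature_words):
--             categories['nature'].append(keyword)
--         elif any(word in keyword_lower for word in culture_words):
--             categories['culture'].append(keyword)
--         elif any(word in keyword_lower for word in activity_words):
--             categories['activities'].append(keyword)
--         elif any(word in keyword_lower for word in food_words):
--             categories['food'].append(keyword)
--         else:
--             categories['other'].append(keyword)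
--
--     return categories
-- ===== SOURCE B (Python) =====
-- from typing import List, Dict, Optional
--
-- def get_keyword_categories(keywords: List[str]) -> Dict[str, List[str]]:
--     """Categorize keywords into different types."""
--     nature_words = {'river', 'mountain', 'forest', 'beach', 'park', 'nature', 'tree', 'water', 'sea', 'lake'}
--     culture_words = {'temple', 'museum', 'ancient', 'historical', 'culture', 'traditional', 'art', 'heritage'}
--     activity_words = {'shopping', 'restaurant', 'cafe', 'market', 'festival', 'tour', 'experience'}
--     food_words = {'food', 'restaurant', 'cafe', 'local', 'cuisine', 'dish', 'taste', 'delicious'}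
--
--     table = [('nature', nature_words), ('culture', culture_words),
--              ('activities', activity_words), ('food', food_words)]
--
--     def categorize(keyword: str) -> str:
--         keyword_lower = keyword.lower()
--         for name, words in table:
--             if any(word in keyword_lower for word in words):
--                 return name
--         return 'other'
--
--     labels = [categorize(kw) for kw in keywords]
--     return {name: [kw for kw, label in zip(keywords, labels) if label == name]
--             for name in ('places', 'nature', 'culture', 'activities', 'food', 'other')}
-- ===== Notes on version B (the rewrite author's own statement) =====
-- stated objective: simpler
-- what changed: Replaces the single-pass if/elif chain that appends into a pre-built dict with a standalone first-match classifier over a (name, word-set) priority table: each keyword is labelled once, and the result dict is built by a comprehension filtering the keywords per category.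
import Mathlib
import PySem

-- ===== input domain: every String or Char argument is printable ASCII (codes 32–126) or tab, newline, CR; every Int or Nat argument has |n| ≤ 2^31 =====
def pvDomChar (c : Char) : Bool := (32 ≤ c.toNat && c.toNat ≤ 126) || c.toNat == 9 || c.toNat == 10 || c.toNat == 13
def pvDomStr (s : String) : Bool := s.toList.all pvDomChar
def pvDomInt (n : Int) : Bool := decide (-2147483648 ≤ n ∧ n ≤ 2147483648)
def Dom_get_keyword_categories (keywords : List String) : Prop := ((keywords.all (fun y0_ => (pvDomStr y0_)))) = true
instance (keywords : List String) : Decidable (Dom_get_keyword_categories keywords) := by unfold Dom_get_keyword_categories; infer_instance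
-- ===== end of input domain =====

-- B replaces A's single-pass if/elif-append loop by a first-match classifier over a priority
-- table plus one filter pass per category (same outputs; objective: simpler, data-driven).

-- ===== PORT A =====
-- word sets (both Pythons contain these literally; `any(word in kl for word in S)` is order-independent)
def pvNatureWords : List String := ["river", "mountain", "forest", "beach", "park", "nature", "tree", "water", "sea", "lake"]
def pvCultureWords : List String := ["temple", "museum", "ancient", "historical", "culture", "traditional", "art", "heritage"]
def pvActivityWords : List String := ["shopping", "restaurant", "cafe", "market", "festival", "tour", "experience"]
def pvFoodWords : List String := ["food", "restaurant", "cafe", "local", "cuisine", "dish", "taste", "delicious"]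

-- A's dict has six fixed keys, so its state is a 6-tuple of the lists; the loop body is the if/elif chain.
def pvStepA (st : List String × List String × List String × List String × List String × List String)
    (keyword : String) :
    List String × List String × List String × List String × List String × List String :=
  let kl := PySem.Str.lower keyword
  if pvNatureWords.any (fun w => PySem.Str.isIn w kl) then
    (st.1, st.2.1 ++ [keyword], st.2.2.1, st.2.2.2.1, st.2.2.2.2.1, st.2.2.2.2.2)
  else if pvCultureWords.any (fun w => PySem.Str.isIn w kl) then
    (st.1, st.2.1, st.2.2.1 ++ [keyword], st.2.2.2.1, st.2.2.2.2.1, st.2.2.2.2.2)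
  else if pvActivityWords.any (fun w => PySem.Str.isIn w kl) then
    (st.1, st.2.1, st.2.2.1, st.2.2.2.1 ++ [keyword], st.2.2.2.2.1, st.2.2.2.2.2)
  else if pvFoodWords.any (fun w => PySem.Str.isIn w kl) then
    (st.1, st.2.1, st.2.2.1, st.2.2.2.1, st.2.2.2.2.1 ++ [keyword], st.2.2.2.2.2)
  else
    (st.1, st.2.1, st.2.2.1, st.2.2.2.1, st.2.2.2.2.1, st.2.2.2.2.2 ++ [keyword])

def get_keyword_categories (keywords : List String) : List (String × List String) :=
  let st := keywords.foldl pvStepA ([], [], [], [], [], [])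
  [("places", st.1), ("nature", st.2.1), ("culture", st.2.2.1),
   ("activities", st.2.2.2.1), ("food", st.2.2.2.2.1), ("other", st.2.2.2.2.2)]

-- ===== PORT B =====
def pvTable : List (String × List String) :=
  [("nature", pvNatureWords), ("culture", pvCultureWords),
   ("activities", pvActivityWords), ("food", pvFoodWords)]

-- B's `for name, words in table: if any(...): return name` / `return 'other'`
def pvCatLoop (kl : String) : List (String × List String) → String
  | [] => "other"
  | (name, words) :: rest =>
      if words.any (fun w => PySem.Str.isIn w kl) then name else pvCatLoop kl rest

def pvCategorize (keyword : String) : String := pvCatLoop (PySem.Str.lower keyword) pvTable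

def get_keyword_categories_alt (keywords : List String) : List (String × List String) :=
  let labels := keywords.map pvCategorize
  ["places", "nature", "culture", "activities", "food", "other"].map
    (fun name => (name, ((keywords.zip labels).filter (fun p => p.2 == name)).map (fun p => p.1)))

-- ===== PRECONDITION & SPEC =====
def Spec_get_keyword_categories (keywords : List String) (out : List (String × List String)) : Prop := out = get_keyword_categories_alt keywords
instance (keywords : List String) (out : List (String × List String)) : Decidable (Spec_get_keyword_categories keywords out) := by unfold Spec_get_keyword_categories; infer_instance

-- ===== CLAIM (what is proved, stated in full; the proofs are below) =====
def Claim_equal_get_keyword_categories : Prop := ∀ (keywords : List String), Dom_get_keyword_categories keywords → Spec_get_keyword_categories keywords (get_keyword_categories keywords)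

-- ===== LEMMAS AND PROOFS =====

lemma pvFoldA_eq (kws : List String)
    (st : List String × List String × List String × List String × List String × List String) :
    kws.foldl pvStepA st =
      (st.1,
       st.2.1 ++ kws.filter (fun kw => pvCategorize kw == "nature"),
       st.2.2.1 ++ kws.filter (fun kw => pvCategorize kw == "culture"),
       st.2.2.2.1 ++ kws.filter (fun kw => pvCategorize kw == "activities"),
       st.2.2.2.2.1 ++ kws.filter (fun kw => pvCategorize kw == "food"),
       st.2.2.2.2.2 ++ kws.filter (fun kw => pvCategorize kw == "other")) := by
  induction kws generalizing st with
  | nil => simp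
  | cons kw kws ih =>
    simp only [List.foldl_cons, List.filter_cons, pvStepA, pvCategorize, pvCatLoop, pvTable]
    by_cases h1 : ∃ x ∈ pvNatureWords, PySem.Chars.isIn x.toList (PySem.Chars.lower kw.toList) = true <;>
      by_cases h2 : ∃ x ∈ pvCultureWords, PySem.Chars.isIn x.toList (PySem.Chars.lower kw.toList) = true <;>
      by_cases h3 : ∃ x ∈ pvActivityWords, PySem.Chars.isIn x.toList (PySem.Chars.lower kw.toList) = true <;>
      by_cases h4 : ∃ x ∈ pvFoodWords, PySem.Chars.isIn x.toList (PySem.Chars.lower kw.toList) = true <;>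
      simp [h1, h2, h3, h4, ih, pvCategorize, pvCatLoop, pvTable]

lemma pvZipFilter (name : String) (kws : List String) :
    (((kws.zip (kws.map pvCategorize)).filter (fun p => p.2 == name)).map (fun p => p.1)) =
      kws.filter (fun kw => pvCategorize kw == name) := by
  induction kws with
  | nil => simp
  | cons kw kws ih =>
    simp only [List.map_cons, List.zip_cons_cons, List.filter_cons]
    by_cases h : (pvCategorize kw == name) = true <;> simp [h, ih]

lemma pvCategorize_ne_places (kw : String) : (pvCategorize kw == "places") = false := by
  simp only [pvCategorize, pvCatLoop, pvTable]
  split_ifs <;> decide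

-- ===== VERDICT (by name: the statement is the Claim_ definition above) =====
theorem get_keyword_categories_spec : Claim_equal_get_keyword_categories := by
  intro kws _
  unfold Spec_get_keyword_categories get_keyword_categories get_keyword_categories_alt
  simp [pvFoldA_eq, pvZipFilter, pvCategorize_ne_places]
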